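-- pv_equiv track=rewrite | github.com/bellkjtt/- | 백준/이분 탐색/2805번 - 나무 자르기.py | bi_search
-- ===== SOURCE A (Python) =====
-- def cal(array,val):
--     cnt=0
--     for i in array:
--         if i>val:
--             cnt+=i-val
--     return cnt
--
-- def bi_search(array, value, low, high):
--     mid = (low + high)//2
--     if low>high:
--         return mid
--     if cal(array,mid)>value:
--         return bi_search(array,value,mid+1,high)
--     elif cal(array, mid)<value:
--         return bi_search(array,value,low,mid-1)
--     else:
--         return mid
-- ===== SOURCE B (Python) =====
-- def bi_search(array, value, low, high):
--     # iterative loop over (low, high); excess computed as a comprehension sum once per step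
--     def excess(h):
--         return sum(x - h for x in array if x > h)
--     while low <= high:
--         m = (low + high) // 2
--         c = excess(m)
--         if c == value:
--             return m
--         if c > value:
--             low = m + 1
--         else:
--             high = m - 1
--     return (low + high) // 2
-- ===== Notes on version B (the rewrite author's own statement) =====
-- stated objective: simpler
-- what changed: Recursive search rewritten as an iterative while-loop with a three-way comparison testing equality first and one excess evaluation per step (A calls cal up to twice), with the counting fold of cal replaced by a filter/map comprehension sum.
import Mathlib
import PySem

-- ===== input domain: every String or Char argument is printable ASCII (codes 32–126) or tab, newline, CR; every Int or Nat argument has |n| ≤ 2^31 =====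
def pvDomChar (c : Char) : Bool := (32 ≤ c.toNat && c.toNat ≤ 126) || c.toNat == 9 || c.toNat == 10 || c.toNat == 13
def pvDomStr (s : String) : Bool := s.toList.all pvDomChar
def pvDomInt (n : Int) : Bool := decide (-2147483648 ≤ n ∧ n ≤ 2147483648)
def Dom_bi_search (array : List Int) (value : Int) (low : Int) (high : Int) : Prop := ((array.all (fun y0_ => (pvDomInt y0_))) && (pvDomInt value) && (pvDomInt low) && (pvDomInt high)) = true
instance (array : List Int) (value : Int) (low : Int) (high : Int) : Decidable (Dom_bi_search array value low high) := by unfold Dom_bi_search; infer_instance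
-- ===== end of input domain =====

-- B replaces A's recursion by an iterative low/high loop with a three-way comparison (equality
-- first, one excess evaluation per step) and computes the excess as a filter/map sum (objective: simpler).


-- termination lemmas for the two ports (cited by name in their decreasing_by)
theorem pvDecA1 (low high : Int) (h : ¬ low > high) :
    (high - (PySem.Int.floordiv (low + high) 2 + 1) + 1).toNat < (high - low + 1).toNat := by
  have hb := PySem.Int.floordiv_two_mid_bounds (lo := low) (hi := high) (by omega)
  omega
theorem pvDecA2 (low high : Int) (h : ¬ low > high) :
    (PySem.Int.floordiv (low + high) 2 - 1 - low + 1).toNat < (high - low + 1).toNat := by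
  have hb := PySem.Int.floordiv_two_mid_bounds (lo := low) (hi := high) (by omega)
  omega
theorem pvDecB1 (lo hi : Int) (h : lo ≤ hi) :
    (hi + 1 - (PySem.Int.floordiv (lo + hi) 2 + 1)).toNat < (hi + 1 - lo).toNat := by
  have hb := PySem.Int.floordiv_two_mid_bounds (lo := lo) (hi := hi) h
  omega
theorem pvDecB2 (lo hi : Int) (h : lo ≤ hi) :
    (PySem.Int.floordiv (lo + hi) 2 - 1 + 1 - lo).toNat < (hi + 1 - lo).toNat := by
  have hb := PySem.Int.floordiv_two_mid_bounds (lo := lo) (hi := hi) h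
  omega

-- ===== PORT A =====
-- Source A's helper cal: running counter over the list
def cal (array : List Int) (val : Int) : Int :=
  array.foldl (fun cnt i => if i > val then cnt + (i - val) else cnt) 0

def bi_search (array : List Int) (value : Int) (low : Int) (high : Int) : Int :=
  let mid := PySem.Int.floordiv (low + high) 2
  if low > high then mid
  else if cal array mid > value then bi_search array value (mid + 1) high
  else if cal array mid < value then bi_search array value low (mid - 1)
  else mid
termination_by (high - low + 1).toNat
decreasing_by
  · exact pvDecA1 low high (by omega)
  · exact pvDecA2 low high (by omega)

-- ===== PORT B =====
-- Source B's excess: sum of a filtered, shifted comprehension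
def excess (array : List Int) (h : Int) : Int :=
  ((array.filter (fun x => decide (h < x))).map (fun x => x - h)).sum

-- Source B's while-loop: state (lo, hi); equality tested first, one excess per step
def biLoop (array : List Int) (value : Int) (lo : Int) (hi : Int) : Int :=
  if hle : lo ≤ hi then
    let m := PySem.Int.floordiv (lo + hi) 2
    let c := excess array m
    if c = value then m
    else if c > value then biLoop array value (m + 1) hi
    else biLoop array value lo (m - 1)
  else PySem.Int.floordiv (lo + hi) 2
termination_by (hi + 1 - lo).toNat
decreasing_by
  · exact pvDecB1 lo hi hle
  · exact pvDecB2 lo hi hle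

def bi_search_alt (array : List Int) (value : Int) (low : Int) (high : Int) : Int :=
  biLoop array value low high

-- ===== PRECONDITION & SPEC =====
def Spec_bi_search (array : List Int) (value : Int) (low : Int) (high : Int) (out : Int) : Prop := out = bi_search_alt array value low high
instance (array : List Int) (value : Int) (low : Int) (high : Int) (out : Int) : Decidable (Spec_bi_search array value low high out) := by unfold Spec_bi_search; infer_instance

-- ===== CLAIM (what is proved, stated in full; the proofs are below) =====
def Claim_equal_bi_search : Prop := ∀ (array : List Int) (value : Int) (low : Int) (high : Int), Dom_bi_search array value low high → Spec_bi_search array value low high (bi_search array value low high)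

-- ===== LEMMAS AND PROOFS =====
-- the counting fold of cal and the comprehension sum of excess agree
theorem cal_foldl_acc (v a : Int) (xs : List Int) :
    xs.foldl (fun cnt i => if i > v then cnt + (i - v) else cnt) a
      = a + ((xs.filter (fun x => decide (v < x))).map (fun x => x - v)).sum := by
  induction xs generalizing a with
  | nil => simp
  | cons x xs ih =>
      by_cases hx : v < x
      · simp [hx, ih, List.foldl_cons]; ring
      · simp [hx, ih]

theorem cal_eq_excess (array : List Int) (v : Int) : cal array v = excess array v := by
  unfold cal excess
  simpa using cal_foldl_acc v 0 array

theorem bi_search_eq_biLoop (array : List Int) (value : Int) (low : Int) (high : Int) :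
    bi_search array value low high = biLoop array value low high := by
  fun_induction bi_search array value low high with
  | case1 low high mid hgt => rw [biLoop, dif_neg (by omega)]
  | case2 low high mid hle hgt ih =>
      rw [biLoop]
      rw [dif_pos (show low ≤ high by omega)]
      simp only [show PySem.Int.floordiv (low + high) 2 = mid from rfl, ← cal_eq_excess,
        if_neg (show ¬ cal array mid = value by omega), if_pos hgt]
      exact ih
  | case3 low high mid hle hgt hlt ih =>
      rw [biLoop]
      rw [dif_pos (show low ≤ high by omega)]
      simp only [show PySem.Int.floordiv (low + high) 2 = mid from rfl, ← cal_eq_excess,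
        if_neg (show ¬ cal array mid = value by omega), if_neg (show ¬ cal array mid > value by omega)]
      exact ih
  | case4 low high mid hle hgt hlt =>
      rw [biLoop]
      rw [dif_pos (show low ≤ high by omega)]
      simp only [show PySem.Int.floordiv (low + high) 2 = mid from rfl, ← cal_eq_excess,
        if_pos (show cal array mid = value by omega)]

-- ===== VERDICT (by name: the statement is the Claim_ definition above) =====
theorem bi_search_spec : Claim_equal_bi_search := by
  intro array value low high _
  unfold Spec_bi_search bi_search_alt
  exact bi_search_eq_biLoop array value low high
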